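-- pv_equiv track=rewrite | github.com/pritchardn/BlockDAG | examples/Binomial.py | binomial_tree
-- ===== SOURCE A (Python) =====
-- def binomial_tree(size):
--     N = 1
--     edges = []
--     vertices = {}
--     for i in range(size):
--         edges += [(edge[0] + N, edge[1] + N) for edge in edges]
--         edges += [(0, N)]
--         N *= 2
--     for i in range(N):
--         vertices[i] = {'data': i}
--     return vertices, edges
-- ===== SOURCE B (Python) =====
-- def binomial_tree(size):
--     def build(n):
--         if n <= 0:
--             return []
--         prev = build(n - 1)
--         h = 2 ** (n - 1)
--         return prev + [(a + h, b + h) for (a, b) in prev] + [(0, h)]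
--     k = max(size, 0)
--     vertices = {i: {'data': i} for i in range(2 ** k)}
--     return vertices, build(k)
-- ===== Notes on version B (the rewrite author's own statement) =====
-- stated objective: alternative
-- what changed: Edges are produced by a recursive helper build(n) (prefix + shifted copy + root edge) instead of A's in-place doubling loop over a mutable edge list and counter N, and vertices come from a dict comprehension over range(2**max(size,0)) instead of a second imperative loop.
import Mathlib
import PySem

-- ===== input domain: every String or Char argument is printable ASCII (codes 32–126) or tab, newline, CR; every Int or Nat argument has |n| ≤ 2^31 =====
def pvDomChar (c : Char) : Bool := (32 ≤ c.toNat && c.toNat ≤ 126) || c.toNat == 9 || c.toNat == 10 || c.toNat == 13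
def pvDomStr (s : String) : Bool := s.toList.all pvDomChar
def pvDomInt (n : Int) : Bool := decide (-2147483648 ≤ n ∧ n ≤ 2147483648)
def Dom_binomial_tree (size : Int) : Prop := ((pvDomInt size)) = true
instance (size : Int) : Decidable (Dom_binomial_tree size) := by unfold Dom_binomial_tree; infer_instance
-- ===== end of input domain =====

-- B rebuilds the edge list by a recursive prefix+shift+root helper and the vertex dict by a
-- comprehension over range(2**max(size,0)), replacing A's doubling loop; alternative decomposition, same cost.

-- ===== PORT A =====
-- the doubling loop: state (N, edges); body appends the shifted copy, then (0, N), then doubles N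
def binomial_tree (size : Int) : (List (Int × List (String × Int))) × (List (Int × Int)) :=
  let st := (PySem.List.pyRange 0 size 1).foldl
      (fun (st : Int × List (Int × Int)) _ =>
        let edges := st.2 ++ st.2.map (fun e => (e.1 + st.1, e.2 + st.1))
        let edges := edges ++ [(0, st.1)]
        (st.1 * 2, edges)) (1, [])
  let vertices := (PySem.List.pyRange 0 st.1 1).foldl
      (fun (d : PySem.Dict Int (List (String × Int))) i => d.insert i [("data", i)])
      PySem.Dict.empty
  (vertices.items, st.2)

-- ===== PORT B =====
-- build(n): [] for n = 0, else prev + shifted prev + root edge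
def bt_build : Nat → List (Int × Int)
  | 0 => []
  | n + 1 =>
    let prev := bt_build n
    let h : Int := 2 ^ n
    prev ++ prev.map (fun e => (e.1 + h, e.2 + h)) ++ [(0, h)]

-- the dict comprehension over range(2**k) has distinct fresh keys; its items list is this map
def binomial_tree_alt (size : Int) : (List (Int × List (String × Int))) × (List (Int × Int)) :=
  let k := size.toNat
  let vertices := (List.range (2 ^ k)).map (fun i : Nat => ((i : Int), [("data", (i : Int))]))
  (vertices, bt_build k)

-- ===== PRECONDITION & SPEC =====
def Spec_binomial_tree (size : Int) (out : (List (Int × List (String × Int))) × (List (Int × Int))) : Prop := out = binomial_tree_alt size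
instance (size : Int) (out : (List (Int × List (String × Int))) × (List (Int × Int))) : Decidable (Spec_binomial_tree size out) := by unfold Spec_binomial_tree; infer_instance

-- ===== CLAIM (what is proved, stated in full; the proofs are below) =====
def Claim_equal_binomial_tree : Prop := ∀ (size : Int), Dom_binomial_tree size → Spec_binomial_tree size (binomial_tree size)

-- ===== LEMMAS AND PROOFS =====

-- A's edge loop, run n times, reaches state (2^n, bt_build n)
theorem bt_loop_eq (n : Nat) :
    (PySem.List.pyRange 0 (n : Int) 1).foldl
      (fun (st : Int × List (Int × Int)) _ =>
        let edges := st.2 ++ st.2.map (fun e => (e.1 + st.1, e.2 + st.1))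
        let edges := edges ++ [(0, st.1)]
        (st.1 * 2, edges)) (1, [])
    = ((2 ^ n : Int), bt_build n) := by
  induction n with
  | zero => simp [bt_build]
  | succ n ih =>
    rw [show ((n + 1 : Nat) : Int) = (n : Int) + 1 by push_cast; ring,
        PySem.List.pyRange_one_succ_right (by positivity), List.foldl_append, ih]
    refine Prod.ext ?_ ?_
    · show (2 : Int) ^ n * 2 = 2 ^ (n + 1)
      ring
    · show bt_build n ++ _ ++ [(0, (2 : Int) ^ n)] = bt_build (n + 1)
      simp [bt_build, List.append_assoc]

theorem bt_verts (M : Nat) :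
    ((PySem.List.pyRange 0 (M : Int) 1).foldl
        (fun (d : PySem.Dict Int (List (String × Int))) i => d.insert i [("data", i)])
        PySem.Dict.empty).items
    = (List.range M).map (fun i : Nat => ((i : Int), [("data", (i : Int))])) := by
  rw [PySem.List.pyRange_one]
  simp only [sub_zero, Int.toNat_natCast, zero_add]
  rw [show (fun (d : PySem.Dict Int (List (String × Int))) (i : Int) => d.insert i [("data", i)])
        = fun d i => d.insert (id i) [("data", i)] from rfl,
      List.foldl_map,
      PySem.Dict.items_foldl_insert_fresh (List.range M) (fun j : Nat => id (j : Int))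
        (fun j : Nat => [("data", (j : Int))]) PySem.Dict.empty
        (by intro a _; simp [PySem.Dict.contains_empty])
        (by simpa using List.Nodup.map (fun a b h => by exact_mod_cast h) List.nodup_range)]
  simp [PySem.Dict.empty]

theorem binomial_tree_spec : Claim_equal_binomial_tree := by
  intro size _
  unfold Spec_binomial_tree binomial_tree binomial_tree_alt
  have hrange : PySem.List.pyRange 0 size 1 = PySem.List.pyRange 0 (size.toNat : Int) 1 := by
    by_cases h : size ≤ 0
    · rw [PySem.List.pyRange_one_eq_nil h,
          PySem.List.pyRange_one_eq_nil (by simp [Int.toNat_of_nonpos h])]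
    · rw [Int.toNat_of_nonneg (by omega)]
  rw [hrange, bt_loop_eq]
  have hcast : ((2 : Int) ^ size.toNat) = ((2 ^ size.toNat : Nat) : Int) := by push_cast; ring
  refine Prod.ext ?_ rfl
  show ((PySem.List.pyRange 0 ((2 : Int) ^ size.toNat) 1).foldl
        (fun (d : PySem.Dict Int (List (String × Int))) i => d.insert i [("data", i)])
        PySem.Dict.empty).items
      = (List.range (2 ^ size.toNat)).map (fun i : Nat => ((i : Int), [("data", (i : Int))]))
  rw [hcast, bt_verts]
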